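-- pv_equiv track=rewrite | github.com/Vic3d/Trade-Bot | scripts/geopolitical_scanner.py | compute_portfolio_impact
-- ===== SOURCE A (Python) =====
-- PORTFOLIO_MAP = {
--     "iran":            {"strategies": ["S1"], "tickers": ["DR0.DE", "EQNR"]},
--     "israelpalestine": {"strategies": ["S1"], "tickers": ["DR0.DE", "EQNR"]},
--     "iraq":            {"strategies": ["S1"], "tickers": ["DR0.DE", "EQNR"]},
--     "libya":           {"strategies": ["S1"], "tickers": ["DR0.DE", "EQNR"]},
--     "saudiarabia":     {"strategies": ["S1"], "tickers": ["DR0.DE", "EQNR"]},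
--     "caribbean":       {"strategies": ["S9"], "tickers": ["S.TO", "CCL", "GLEN.L"]},
--     "venezuela":       {"strategies": ["S9"], "tickers": ["S.TO", "CCL"]},
--     "russia":          {"strategies": ["S1", "S2"], "tickers": ["RHM.DE", "DR0.DE"]},
--     "taiwan":          {"strategies": ["S3"], "tickers": ["NVDA", "MSFT"]},
--     "china":           {"strategies": ["S3"], "tickers": ["NVDA", "MSFT", "MP"]},
--     "koreas":          {"strategies": ["S3"], "tickers": ["NVDA"]},
-- }
--
-- def compute_portfolio_impact(alert_items):
--     """Berechne affected_strategies und affected_tickers aus alert_items."""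
--     strategies = set()
--     tickers = set()
--
--     for item in alert_items:
--         slug = item.get("source", "")
--         if slug in PORTFOLIO_MAP:
--             for s in PORTFOLIO_MAP[slug]["strategies"]:
--                 strategies.add(s)
--             for t in PORTFOLIO_MAP[slug]["tickers"]:
--                 tickers.add(t)
--
--     return sorted(strategies), sorted(tickers)
-- ===== SOURCE B (Python) =====
-- # flat row table: (slug, strategies, tickers)
-- _ROWS = [
--     ("iran",            ["S1"],       ["DR0.DE", "EQNR"]),
--     ("israelpalestine", ["S1"],       ["DR0.DE", "EQNR"]),
--     ("iraq",            ["S1"],       ["DR0.DE", "EQNR"]),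
--     ("libya",           ["S1"],       ["DR0.DE", "EQNR"]),
--     ("saudiarabia",     ["S1"],       ["DR0.DE", "EQNR"]),
--     ("caribbean",       ["S9"],       ["S.TO", "CCL", "GLEN.L"]),
--     ("venezuela",       ["S9"],       ["S.TO", "CCL"]),
--     ("russia",          ["S1", "S2"], ["RHM.DE", "DR0.DE"]),
--     ("taiwan",          ["S3"],       ["NVDA", "MSFT"]),
--     ("china",           ["S3"],       ["NVDA", "MSFT", "MP"]),
--     ("koreas",          ["S3"],       ["NVDA"]),
-- ]
--
--
-- def compute_portfolio_impact(alert_items):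
--     """Berechne affected_strategies und affected_tickers aus alert_items."""
--     present = {item.get("source", "") for item in alert_items}
--     hit = [row for row in _ROWS if row[0] in present]
--     strategies = sorted({s for _, ss, _ in hit for s in ss})
--     tickers = sorted({t for _, _, ts in hit for t in ts})
--     return strategies, tickers
-- ===== Notes on version B (the rewrite author's own statement) =====
-- stated objective: alternative
-- what changed: B replaces A's per-alert-item dict lookups with fold-unions into two accumulator sets by: deduplicating the source slugs into a set once, filtering a flat (slug, strategies, tickers) row table against that set, and flattening the hit rows' lists with set comprehensions before sorting; no per-item map lookup and no incremental accumulator remain.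
import Mathlib
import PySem

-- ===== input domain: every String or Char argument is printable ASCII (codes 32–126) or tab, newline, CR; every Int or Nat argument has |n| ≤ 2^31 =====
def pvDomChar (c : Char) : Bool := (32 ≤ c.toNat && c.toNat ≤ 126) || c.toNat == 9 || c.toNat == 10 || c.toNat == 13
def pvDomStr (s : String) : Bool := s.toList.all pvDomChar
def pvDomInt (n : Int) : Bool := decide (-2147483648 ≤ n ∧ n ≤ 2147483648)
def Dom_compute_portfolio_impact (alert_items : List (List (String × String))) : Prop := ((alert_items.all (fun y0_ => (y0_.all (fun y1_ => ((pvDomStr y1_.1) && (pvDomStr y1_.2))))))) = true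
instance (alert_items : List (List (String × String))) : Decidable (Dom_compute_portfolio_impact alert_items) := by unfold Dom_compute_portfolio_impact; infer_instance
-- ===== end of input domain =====

-- B deduplicates the source slugs into a set once, filters a flat (slug, strategies, tickers) row
-- table against it, and flattens the hit rows into the two result sets — instead of A's per-item
-- map lookups fold-unioning two accumulator sets.

-- ===== PORT A =====
-- module constant PORTFOLIO_MAP (A's nested-dict form)
def pvPortfolioMap : PySem.Dict String (PySem.Dict String (List String)) :=
  PySem.Dict.mk [
    ("iran",            PySem.Dict.mk [("strategies", ["S1"]), ("tickers", ["DR0.DE", "EQNR"])]),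
    ("israelpalestine", PySem.Dict.mk [("strategies", ["S1"]), ("tickers", ["DR0.DE", "EQNR"])]),
    ("iraq",            PySem.Dict.mk [("strategies", ["S1"]), ("tickers", ["DR0.DE", "EQNR"])]),
    ("libya",           PySem.Dict.mk [("strategies", ["S1"]), ("tickers", ["DR0.DE", "EQNR"])]),
    ("saudiarabia",     PySem.Dict.mk [("strategies", ["S1"]), ("tickers", ["DR0.DE", "EQNR"])]),
    ("caribbean",       PySem.Dict.mk [("strategies", ["S9"]), ("tickers", ["S.TO", "CCL", "GLEN.L"])]),
    ("venezuela",       PySem.Dict.mk [("strategies", ["S9"]), ("tickers", ["S.TO", "CCL"])]),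
    ("russia",          PySem.Dict.mk [("strategies", ["S1", "S2"]), ("tickers", ["RHM.DE", "DR0.DE"])]),
    ("taiwan",          PySem.Dict.mk [("strategies", ["S3"]), ("tickers", ["NVDA", "MSFT"])]),
    ("china",           PySem.Dict.mk [("strategies", ["S3"]), ("tickers", ["NVDA", "MSFT", "MP"])]),
    ("koreas",          PySem.Dict.mk [("strategies", ["S3"]), ("tickers", ["NVDA"])])]

-- item.get("source", "")  (an alert item is a Python dict, modelled as its association list)
def pvSource (item : List (String × String)) : String :=
  PySem.Dict.getD (PySem.Dict.mk item) "source" ""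

-- one iteration of A's 'for item in alert_items' loop; 'slug in PORTFOLIO_MAP' + the guarded
-- PORTFOLIO_MAP[slug] lookup is the match on get? (KeyError impossible under the guard);
-- entry["strategies"] / entry["tickers"] via getD is exact: every pvPortfolioMap value has both keys
def pvStepA (acc : PySem.Set String × PySem.Set String) (item : List (String × String)) :
    PySem.Set String × PySem.Set String :=
  match PySem.Dict.get? pvPortfolioMap (pvSource item) with
  | some entry =>
      ((PySem.Dict.getD entry "strategies" []).foldl PySem.Set.add acc.1,
       (PySem.Dict.getD entry "tickers" []).foldl PySem.Set.add acc.2)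
  | none => acc

def compute_portfolio_impact (alert_items : List (List (String × String))) : List String × List String :=
  let st := alert_items.foldl pvStepA (PySem.Set.empty, PySem.Set.empty)
  (PySem.List.sorted st.1 (fun x => x) false, PySem.List.sorted st.2 (fun x => x) false)

-- ===== PORT B =====
-- B's flat module constant _ROWS: (slug, strategies, tickers)
def pvRows : List (String × List String × List String) := [
  ("iran",            ["S1"],       ["DR0.DE", "EQNR"]),
  ("israelpalestine", ["S1"],       ["DR0.DE", "EQNR"]),
  ("iraq",            ["S1"],       ["DR0.DE", "EQNR"]),
  ("libya",           ["S1"],       ["DR0.DE", "EQNR"]),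
  ("saudiarabia",     ["S1"],       ["DR0.DE", "EQNR"]),
  ("caribbean",       ["S9"],       ["S.TO", "CCL", "GLEN.L"]),
  ("venezuela",       ["S9"],       ["S.TO", "CCL"]),
  ("russia",          ["S1", "S2"], ["RHM.DE", "DR0.DE"]),
  ("taiwan",          ["S3"],       ["NVDA", "MSFT"]),
  ("china",           ["S3"],       ["NVDA", "MSFT", "MP"]),
  ("koreas",          ["S3"],       ["NVDA"])]

-- item.get("source", "") — first match in the association list (exact: dict lookup is first match)
def pvSrcB (item : List (String × String)) : String :=
  ((item.find? (fun p => p.1 == "source")).map Prod.snd).getD ""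

def compute_portfolio_impact_alt (alert_items : List (List (String × String))) : List String × List String :=
  let present : PySem.Set String := PySem.Set.ofList (alert_items.map pvSrcB)
  let hit := pvRows.filter (fun r => PySem.Set.contains present r.1)
  (PySem.List.sorted (PySem.Set.ofList (hit.flatMap (fun r => r.2.1))) (fun x => x) false,
   PySem.List.sorted (PySem.Set.ofList (hit.flatMap (fun r => r.2.2))) (fun x => x) false)

-- ===== PRECONDITION & SPEC =====
def Spec_compute_portfolio_impact (alert_items : List (List (String × String))) (out : List String × List String) : Prop := out = compute_portfolio_impact_alt alert_items
instance (alert_items : List (List (String × String))) (out : List String × List String) : Decidable (Spec_compute_portfolio_impact alert_items out) := by unfold Spec_compute_portfolio_impact; infer_instance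

-- ===== CLAIM (what is proved, stated in full; the proofs are below) =====
def Claim_equal_compute_portfolio_impact : Prop := ∀ (alert_items : List (List (String × String))), Dom_compute_portfolio_impact alert_items → Spec_compute_portfolio_impact alert_items (compute_portfolio_impact alert_items)

-- ===== LEMMAS AND PROOFS =====

-- the two 'source' lookups agree (dict lookup is first match in the association list)
theorem pvSrc_eq (item : List (String × String)) : pvSource item = pvSrcB item := by
  rfl

-- get? hits are items of the dict
theorem pv_get?_mem {ν : Type} (d : PySem.Dict String ν) (k : String) (v : ν)
    (h : PySem.Dict.get? d k = some v) : (k, v) ∈ d.items := by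
  unfold PySem.Dict.get? at h
  cases hf : List.find? (fun p => p.1 == k) d.items with
  | none => simp [hf] at h
  | some p =>
    have hm := List.mem_of_find?_eq_some hf
    have hp := List.find?_some hf
    simp [hf] at h
    have hk : p.1 = k := by simpa using hp
    have : (k, v) = p := by rw [← hk, ← h]
    rwa [this]

-- every map entry has a matching row (same slug, same two lists)
theorem pv_rows_complete : ∀ kv ∈ pvPortfolioMap.items,
    pvRows.any (fun r => r.1 == kv.1
      && decide (r.2.1 = PySem.Dict.getD kv.2 "strategies" [])
      && decide (r.2.2 = PySem.Dict.getD kv.2 "tickers" [])) = true := by decide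

-- every row's slug is found in the map, yielding exactly the row's two lists
theorem pv_rows_sound : ∀ r ∈ pvRows,
    (PySem.Dict.get? pvPortfolioMap r.1).map
      (fun e => (PySem.Dict.getD e "strategies" [], PySem.Dict.getD e "tickers" []))
      = some (r.2.1, r.2.2) := by decide

-- the A-side loop invariant: nodup accumulators stay nodup, and membership in the result
-- is membership in the accumulator or contribution by some item of the list
theorem pvA_invariant (L : List (List (String × String))) :
    ∀ (s t : PySem.Set String), s.Nodup → t.Nodup →
      (L.foldl pvStepA (s, t)).1.Nodup ∧ (L.foldl pvStepA (s, t)).2.Nodup ∧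
      (∀ x, x ∈ (L.foldl pvStepA (s, t)).1 ↔ x ∈ s ∨ ∃ it ∈ L, ∃ e,
          PySem.Dict.get? pvPortfolioMap (pvSource it) = some e ∧ x ∈ PySem.Dict.getD e "strategies" []) ∧
      (∀ x, x ∈ (L.foldl pvStepA (s, t)).2 ↔ x ∈ t ∨ ∃ it ∈ L, ∃ e,
          PySem.Dict.get? pvPortfolioMap (pvSource it) = some e ∧ x ∈ PySem.Dict.getD e "tickers" []) := by
  induction L with
  | nil => intro s t hs ht; simp [hs, ht]
  | cons it L ih =>
    intro s t hs ht
    simp only [List.foldl_cons]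
    cases hget : PySem.Dict.get? pvPortfolioMap (pvSource it) with
    | none =>
      have h := ih s t hs ht
      simp only [pvStepA, hget]
      refine ⟨h.1, h.2.1, fun x => ?_, fun x => ?_⟩
      · rw [h.2.2.1 x]; simp [hget]
      · rw [h.2.2.2 x]; simp [hget]
    | some e =>
      have hs' : (PySem.Set.update s (PySem.Dict.getD e "strategies" [])).Nodup :=
        PySem.Set.nodup_update s _ hs
      have ht' : (PySem.Set.update t (PySem.Dict.getD e "tickers" [])).Nodup :=
        PySem.Set.nodup_update t _ ht
      have h := ih _ _ hs' ht'
      have hstep : pvStepA (s, t) it =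
          (PySem.Set.update s (PySem.Dict.getD e "strategies" []),
           PySem.Set.update t (PySem.Dict.getD e "tickers" [])) := by
        simp [pvStepA, hget, PySem.Set.update]
      rw [hstep]
      refine ⟨h.1, h.2.1, fun x => ?_, fun x => ?_⟩
      · rw [h.2.2.1 x, PySem.Set.mem_update]
        simp only [List.exists_mem_cons_iff, hget, Option.some.injEq]
        constructor
        · rintro ((h1 | h1) | h1)
          · exact Or.inl h1
          · exact Or.inr (Or.inl ⟨e, rfl, h1⟩)
          · exact Or.inr (Or.inr h1)
        · rintro (h1 | ⟨e', he', h1⟩ | h1)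
          · exact Or.inl (Or.inl h1)
          · exact Or.inl (Or.inr (he' ▸ h1))
          · exact Or.inr h1
      · rw [h.2.2.2 x, PySem.Set.mem_update]
        simp only [List.exists_mem_cons_iff, hget, Option.some.injEq]
        constructor
        · rintro ((h1 | h1) | h1)
          · exact Or.inl h1
          · exact Or.inr (Or.inl ⟨e, rfl, h1⟩)
          · exact Or.inr (Or.inr h1)
        · rintro (h1 | ⟨e', he', h1⟩ | h1)
          · exact Or.inl (Or.inl h1)
          · exact Or.inl (Or.inr (he' ▸ h1))
          · exact Or.inr h1

-- the bridge: contribution by some alert item (A's view, over the nested map)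
-- = contribution by some hit row (B's view, over the flat table); sel picks the row component
theorem pv_bridge (L : List (List (String × String))) (key : String)
    (sel : String × List String × List String → List String)
    (hsel : ∀ r ∈ pvRows, ∀ e, PySem.Dict.get? pvPortfolioMap r.1 = some e →
        sel r = PySem.Dict.getD e key []) (x : String) :
    (∃ it ∈ L, ∃ e, PySem.Dict.get? pvPortfolioMap (pvSource it) = some e ∧
        x ∈ PySem.Dict.getD e key []) ↔
    (∃ r ∈ pvRows.filter
        (fun r => PySem.Set.contains (PySem.Set.ofList (L.map pvSrcB)) r.1), x ∈ sel r) := by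
  constructor
  · rintro ⟨it, hit, e, hget, hx⟩
    have hkv := pv_get?_mem _ _ _ hget
    have hany := pv_rows_complete _ hkv
    rw [List.any_eq_true] at hany
    obtain ⟨r, hr, hcond⟩ := hany
    simp only [Bool.and_eq_true, beq_iff_eq, decide_eq_true_eq] at hcond
    obtain ⟨⟨hk, _⟩, _⟩ := hcond
    refine ⟨r, List.mem_filter.mpr ⟨hr, ?_⟩, ?_⟩
    · rw [PySem.Set.contains_iff, PySem.Set.mem_ofList, List.mem_map]
      exact ⟨it, hit, by rw [← pvSrc_eq, ← hk]⟩
    · have := hsel r hr e (by rw [hk]; exact hget)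
      rw [this]; exact hx
  · rintro ⟨r, hrf, hx⟩
    have hr := (List.mem_filter.mp hrf).1
    have hc := (List.mem_filter.mp hrf).2
    rw [PySem.Set.contains_iff, PySem.Set.mem_ofList, List.mem_map] at hc
    obtain ⟨it, hit, hsrc⟩ := hc
    have hs := pv_rows_sound r hr
    cases hget : PySem.Dict.get? pvPortfolioMap r.1 with
    | none => rw [hget] at hs; simp at hs
    | some e =>
      refine ⟨it, hit, e, by rw [pvSrc_eq, hsrc]; exact hget, ?_⟩
      have := hsel r hr e hget
      rw [← this]; exact hx

-- pv_rows_sound specialised to the two selectors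
theorem pv_sel_strat : ∀ r ∈ pvRows, ∀ e, PySem.Dict.get? pvPortfolioMap r.1 = some e →
    r.2.1 = PySem.Dict.getD e "strategies" [] := by
  intro r hr e hget
  have hs := pv_rows_sound r hr
  rw [hget] at hs
  simp only [Option.map_some, Option.some.injEq, Prod.mk.injEq] at hs
  exact hs.1.symm

theorem pv_sel_tick : ∀ r ∈ pvRows, ∀ e, PySem.Dict.get? pvPortfolioMap r.1 = some e →
    r.2.2 = PySem.Dict.getD e "tickers" [] := by
  intro r hr e hget
  have hs := pv_rows_sound r hr
  rw [hget] at hs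
  simp only [Option.map_some, Option.some.injEq, Prod.mk.injEq] at hs
  exact hs.2.symm

-- ===== VERDICT (by name: the statement is the Claim_ definition above) =====
theorem compute_portfolio_impact_spec : Claim_equal_compute_portfolio_impact := by
  intro alert_items _
  unfold Spec_compute_portfolio_impact compute_portfolio_impact compute_portfolio_impact_alt
  have hA := pvA_invariant alert_items PySem.Set.empty PySem.Set.empty List.nodup_nil List.nodup_nil
  have hinj : Function.Injective (fun x : String => x) := fun a b h => h
  have hperm1 : (alert_items.foldl pvStepA (PySem.Set.empty, PySem.Set.empty)).1.Perm
      (PySem.Set.ofList ((pvRows.filter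
        (fun r => PySem.Set.contains (PySem.Set.ofList (alert_items.map pvSrcB)) r.1)).flatMap
        (fun r => r.2.1))) := by
    rw [List.perm_ext_iff_of_nodup hA.1 (PySem.Set.nodup_ofList _)]
    intro x
    rw [hA.2.2.1 x, PySem.Set.mem_ofList, List.mem_flatMap]
    simp only [PySem.Set.empty, List.not_mem_nil, false_or]
    exact (pv_bridge alert_items "strategies" (fun r => r.2.1) pv_sel_strat x).trans
      (by constructor <;> (rintro ⟨r, h1, h2⟩; exact ⟨r, h1, h2⟩))
  have hperm2 : (alert_items.foldl pvStepA (PySem.Set.empty, PySem.Set.empty)).2.Perm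
      (PySem.Set.ofList ((pvRows.filter
        (fun r => PySem.Set.contains (PySem.Set.ofList (alert_items.map pvSrcB)) r.1)).flatMap
        (fun r => r.2.2))) := by
    rw [List.perm_ext_iff_of_nodup hA.2.1 (PySem.Set.nodup_ofList _)]
    intro x
    rw [hA.2.2.2 x, PySem.Set.mem_ofList, List.mem_flatMap]
    simp only [PySem.Set.empty, List.not_mem_nil, false_or]
    exact (pv_bridge alert_items "tickers" (fun r => r.2.2) pv_sel_tick x).trans
      (by constructor <;> (rintro ⟨r, h1, h2⟩; exact ⟨r, h1, h2⟩))
  simp only []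
  exact Prod.ext (PySem.List.sorted_eq_sorted_of_perm _ _ _ hinj hperm1)
    (PySem.List.sorted_eq_sorted_of_perm _ _ _ hinj hperm2)
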